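-- pv_equiv track=rewrite | github.com/karthikjanagiraman/DayTrader | trader/backtest/analyze_failed_trades_volume.py | check_delayed_momentum
-- ===== SOURCE A (Python) =====
-- def check_delayed_momentum(entry_reason):
--     """Check if entry was a delayed momentum entry"""
--     if not entry_reason:
--         return False
--
--     entry_reason_lower = entry_reason.lower()
--
--     # Check for delayed momentum indicators
--     if 'delayed' in entry_reason_lower:
--         return True
--
--     # Check for candle number in reason (e.g., "on candle 30")
--     if 'candle' in entry_reason_lower and any(str(i) in entry_reason for i in range(10, 200)):
--         return True
--
--     return False
-- ===== SOURCE B (Python) =====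
-- def check_delayed_momentum(entry_reason):
--     """Check if entry was a delayed momentum entry"""
--     if not entry_reason:
--         return False
--
--     lower = entry_reason.lower()
--     if 'delayed' in lower:
--         return True
--     if 'candle' not in lower:
--         return False
--     # a nonzero digit followed by a digit appears in the string exactly when some
--     # str(i), 10 <= i < 200, appears in it (100..199 all contain such a prefix)
--     return any('1' <= a <= '9' and '0' <= b <= '9'
--                for a, b in zip(entry_reason, entry_reason[1:]))
-- ===== Notes on version B (the rewrite author's own statement) =====
-- stated objective: alternative
-- what changed: Replaces A's scan of 190 substring tests (searching each of str(10)..str(199) in the string) with a single adjacent-pair pass that detects a nonzero digit immediately followed by a digit, which is present exactly when some str(i), 10 <= i < 200, is a substring.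
import Mathlib
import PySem

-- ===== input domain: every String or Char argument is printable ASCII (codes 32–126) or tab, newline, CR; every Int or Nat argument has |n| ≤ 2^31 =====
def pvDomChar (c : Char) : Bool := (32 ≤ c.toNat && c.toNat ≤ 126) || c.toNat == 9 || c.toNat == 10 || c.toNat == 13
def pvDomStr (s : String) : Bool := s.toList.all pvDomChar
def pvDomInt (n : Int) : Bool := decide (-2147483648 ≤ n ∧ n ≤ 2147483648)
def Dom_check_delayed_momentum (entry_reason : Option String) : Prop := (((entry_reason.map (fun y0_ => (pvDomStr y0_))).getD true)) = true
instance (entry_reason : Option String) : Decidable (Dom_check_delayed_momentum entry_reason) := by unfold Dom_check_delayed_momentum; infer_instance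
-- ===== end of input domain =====

-- B: same guards, but replaces A's 190-substring scan over range(10,200) with a single
-- adjacent-pair pass looking for a nonzero digit followed by a digit (objective: alternative).


-- ===== PORT A =====
def check_delayed_momentum (entry_reason : Option String) : Bool :=
  match entry_reason with
  | none => false
  | some s =>
    if s = "" then false
    else
      let entry_reason_lower := PySem.Str.lower s
      if PySem.Str.isIn "delayed" entry_reason_lower then true
      else if PySem.Str.isIn "candle" entry_reason_lower &&
          (PySem.List.pyRange 10 200 1).any (fun i => PySem.Str.isIn (PySem.Int.toStr i) s) then
        true
      else false

-- ===== PORT B =====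
-- '1' <= a <= '9' and '0' <= b <= '9'  on a zipped adjacent pair
def pvGoodPair (p : Char × Char) : Bool :=
  decide ('1' ≤ p.1 ∧ p.1 ≤ '9') && decide ('0' ≤ p.2 ∧ p.2 ≤ '9')

def check_delayed_momentum_alt (entry_reason : Option String) : Bool :=
  match entry_reason with
  | none => false
  | some s =>
    if s = "" then false
    else
      let lower := PySem.Str.lower s
      if PySem.Str.isIn "delayed" lower then true
      else if !(PySem.Str.isIn "candle" lower) then false
      else (s.toList.zip s.toList.tail).any pvGoodPair

-- ===== PRECONDITION & SPEC =====
def Spec_check_delayed_momentum (entry_reason : Option String) (out : Bool) : Prop := out = check_delayed_momentum_alt entry_reason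
instance (entry_reason : Option String) (out : Bool) : Decidable (Spec_check_delayed_momentum entry_reason out) := by unfold Spec_check_delayed_momentum; infer_instance

-- ===== CLAIM (what is proved, stated in full; the proofs are below) =====
def Claim_equal_check_delayed_momentum : Prop := ∀ (entry_reason : Option String), Dom_check_delayed_momentum entry_reason → Spec_check_delayed_momentum entry_reason (check_delayed_momentum entry_reason)

-- ===== LEMMAS AND PROOFS =====

-- the adjacent-pair scan finds a good pair exactly when some [a,b] with a good pair is an infix
lemma zip_any_goodPair_iff (cs : List Char) :
    (cs.zip cs.tail).any pvGoodPair = true ↔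
      ∃ a b, pvGoodPair (a, b) = true ∧ [a, b] <:+: cs := by
  induction cs with
  | nil => simp
  | cons x t ih =>
    cases t with
    | nil =>
      simp only [List.tail_cons, List.zip_nil_right, List.any_nil]
      refine iff_of_false (by simp) ?_
      rintro ⟨a, b, -, hinf⟩
      have := hinf.length_le
      simp at this
    | cons y u =>
      simp only [List.tail_cons] at ih
      simp only [List.tail_cons, List.zip_cons_cons, List.any_cons, Bool.or_eq_true, ih]
      constructor
      · rintro (h | ⟨a, b, hg, hinf⟩)
        · exact ⟨x, y, h, ⟨[], u, rfl⟩⟩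
        · exact ⟨a, b, hg, hinf.trans ⟨[x], [], by simp⟩⟩
      · rintro ⟨a, b, hg, hinf⟩
        rcases List.infix_cons_iff.mp hinf with hpre | hin
        · left
          obtain ⟨r, hr⟩ := hpre
          obtain ⟨rfl, rfl, -⟩ : a = x ∧ b = y ∧ r = u := by simpa using hr
          exact hg
        · right; exact ⟨a, b, hg, hin⟩

-- str(i) for 10 ≤ i < 200 starts with a nonzero digit followed by a digit
lemma toChars_head2 (i : Int) (h1 : 10 ≤ i) (h2 : i < 200) :
    ∃ c0 c1 rest, PySem.Int.toChars i = c0 :: c1 :: rest ∧ pvGoodPair (c0, c1) = true := by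
  interval_cases i <;> exact ⟨_, _, _, rfl, rfl⟩

-- str of a two-digit number, digit by digit
lemma toChars_two_digit (n : Nat) (h1 : 10 ≤ n) (h2 : n ≤ 99) :
    PySem.Int.toChars (n : Int) = [Char.ofNat (48 + n / 10), Char.ofNat (48 + n % 10)] := by
  interval_cases n <;> decide

-- A's 190-substring test equals B's adjacent-pair scan
lemma range_scan_eq_pair_scan (cs : List Char) :
    (PySem.List.pyRange 10 200 1).any
        (fun i => PySem.Chars.isIn (PySem.Int.toChars i) cs) =
      (cs.zip cs.tail).any pvGoodPair := by
  rw [Bool.eq_iff_iff, List.any_eq_true, zip_any_goodPair_iff]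
  constructor
  · rintro ⟨i, hmem, hin⟩
    obtain ⟨h1, h2⟩ := (PySem.List.mem_pyRange_one).mp hmem
    obtain ⟨c0, c1, rest, heq, hg⟩ := toChars_head2 i h1 h2
    refine ⟨c0, c1, hg, ?_⟩
    have hinf : PySem.Int.toChars i <:+: cs := (PySem.Chars.isIn_iff_infix _ _).mp hin
    have : [c0, c1] <:+: PySem.Int.toChars i := by
      rw [heq]; exact ⟨[], rest, rfl⟩
    exact this.trans hinf
  · rintro ⟨a, b, hg, hinf⟩
    have hgp := hg
    unfold pvGoodPair at hgp
    simp only [Bool.and_eq_true, decide_eq_true_eq] at hgp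
    obtain ⟨⟨ha1, ha2⟩, hb1, hb2⟩ := hgp
    have ha1' : 49 ≤ a.toNat := ha1
    have ha2' : a.toNat ≤ 57 := ha2
    have hb1' : 48 ≤ b.toNat := hb1
    have hb2' : b.toNat ≤ 57 := hb2
    set n : Nat := (a.toNat - 48) * 10 + (b.toNat - 48) with hn
    have hn1 : 10 ≤ n := by omega
    have hn2 : n ≤ 99 := by omega
    refine ⟨(n : Int), ?_, ?_⟩
    · exact (PySem.List.mem_pyRange_one).mpr ⟨by exact_mod_cast hn1, by omega⟩
    · rw [PySem.Chars.isIn_iff_infix, toChars_two_digit n hn1 hn2]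
      have hdiv : 48 + n / 10 = a.toNat := by omega
      have hmod : 48 + n % 10 = b.toNat := by omega
      rw [hdiv, hmod, Char.ofNat_toNat, Char.ofNat_toNat]
      exact hinf

-- A's 190-substring test, at String level
lemma range_scan_eq_pair_scan' (s : String) :
    (PySem.List.pyRange 10 200 1).any
        (fun i => PySem.Str.isIn (PySem.Int.toStr i) s) =
      (s.toList.zip s.toList.tail).any pvGoodPair := by
  simp only [PySem.Str.isIn_eq, PySem.Int.toList_toStr]
  exact range_scan_eq_pair_scan _

-- the two branch structures agree, boolean case split
lemma branch_shape (d c p : Bool) :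
    (if d = true then true else if (c && p) = true then true else false) =
      (if d = true then true else if (!c) = true then false else p) := by
  cases d <;> cases c <;> cases p <;> rfl

-- ===== VERDICT (by name: the statement is the Claim_ definition above) =====
theorem check_delayed_momentum_spec : Claim_equal_check_delayed_momentum := by
  intro er _
  unfold Spec_check_delayed_momentum
  cases er with
  | none => rfl
  | some s =>
    by_cases h0 : s = ""
    · simp [check_delayed_momentum, check_delayed_momentum_alt, h0]
    · simp only [check_delayed_momentum, check_delayed_momentum_alt, if_neg h0]
      rw [range_scan_eq_pair_scan']
      exact branch_shape _ _ _
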